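-- pv_equiv track=rewrite | github.com/MomentsLD/moments | moments/LinearSystem.py | index_1D
-- ===== SOURCE A (Python) =====
-- def index_1D(ind, dims):
--     res = 0
--     for i in range(len(dims)):
--         f = 1
--         for j in range(len(dims) - i - 1):
--             f *= dims[len(dims) - 1 - j]
--         res += f * ind[i]
--     return res
-- ===== SOURCE B (Python) =====
-- def index_1D(ind, dims):
--     res = 0
--     f = 1
--     for i in range(len(dims) - 1, -1, -1):
--         res += f * ind[i]
--         f *= dims[i]
--     return res
-- ===== Notes on version B (the rewrite author's own statement) =====
-- stated objective: faster
-- what changed: Instead of recomputing the suffix product of dims from scratch for every axis (nested loops), B makes one right-to-left pass keeping a running stride that is multiplied up incrementally.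
import Mathlib
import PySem

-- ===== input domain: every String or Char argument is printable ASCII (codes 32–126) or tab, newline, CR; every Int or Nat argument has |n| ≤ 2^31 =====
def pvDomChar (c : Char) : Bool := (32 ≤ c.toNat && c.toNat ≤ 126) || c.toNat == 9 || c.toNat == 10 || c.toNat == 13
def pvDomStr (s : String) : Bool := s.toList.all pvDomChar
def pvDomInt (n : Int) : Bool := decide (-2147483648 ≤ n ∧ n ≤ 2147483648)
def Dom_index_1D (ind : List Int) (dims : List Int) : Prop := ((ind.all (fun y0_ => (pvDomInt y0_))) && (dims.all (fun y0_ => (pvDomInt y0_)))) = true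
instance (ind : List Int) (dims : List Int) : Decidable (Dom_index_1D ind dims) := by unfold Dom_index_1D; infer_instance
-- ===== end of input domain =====

-- B replaces A's per-axis recomputation of the suffix product (nested loops) by one
-- right-to-left pass with a running stride (faster; same return value on Pre_).

-- ===== PORT A =====
def index_1D (ind : List Int) (dims : List Int) : Int :=
  (PySem.List.pyRange 0 (dims.length : Int) 1).foldl (fun res i =>
    let f : Int :=
      (PySem.List.pyRange 0 ((dims.length : Int) - i - 1) 1).foldl
        (fun f j => f * PySem.List.pyGetD dims ((dims.length : Int) - 1 - j) 0) 1
    res + f * PySem.List.pyGetD ind i 0) 0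

-- ===== PORT B =====
def index_1D_alt (ind : List Int) (dims : List Int) : Int :=
  ((PySem.List.pyRange ((dims.length : Int) - 1) (-1) (-1)).foldl
    (fun (s : Int × Int) i =>
      (s.1 + s.2 * PySem.List.pyGetD ind i 0, s.2 * PySem.List.pyGetD dims i 0))
    (0, 1)).1

-- ===== PRECONDITION & SPEC =====
-- Pre_ excludes exactly the inputs where the Python A raises IndexError: ind shorter than dims.
def Pre_index_1D (ind : List Int) (dims : List Int) : Prop := dims.length ≤ ind.length
instance (ind : List Int) (dims : List Int) : Decidable (Pre_index_1D ind dims) := by unfold Pre_index_1D; infer_instance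
def pvWitness_index_1D : List Int × List Int := ([1, 2], [3, 4])

def Spec_index_1D (ind : List Int) (dims : List Int) (out : Int) : Prop := out = index_1D_alt ind dims
instance (ind : List Int) (dims : List Int) (out : Int) : Decidable (Spec_index_1D ind dims out) := by unfold Spec_index_1D; infer_instance

-- ===== CLAIM (what is proved, stated in full; the proofs are below) =====
def Claim_equal_index_1D : Prop := ∀ (ind : List Int) (dims : List Int), Dom_index_1D ind dims → Pre_index_1D ind dims → Spec_index_1D ind dims (index_1D ind dims)

-- ===== LEMMAS AND PROOFS =====

-- the common value: pvG ind dims = Σ_i ind[i] * Π dims[i+1:]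
def pvG : List Int → List Int → Int
  | x :: xs, d :: ds => x * ds.prod + pvG xs ds
  | _, _ => 0

theorem pvG_nil_right (ind : List Int) : pvG ind [] = 0 := by cases ind <;> rfl

theorem pvG_cons (ind : List Int) (d : Int) (ds : List Int) :
    pvG ind (d :: ds) = ind.getD 0 0 * ds.prod + pvG ind.tail ds := by
  cases ind <;> simp [pvG]

theorem getD_tail (ind : List Int) (k : Nat) (d : Int) :
    ind.getD (k + 1) d = ind.tail.getD k d := by
  cases ind <;> simp

-- A's inner loop, as a function of the (Nat) axis index
def pvFA (dims : List Int) (k : Nat) : Int :=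
  ((List.range (dims.length - k - 1)).map (fun j => dims.getD (dims.length - 1 - j) 0)).prod

theorem pvFA_succ (d : Int) (ds : List Int) (k : Nat) :
    pvFA (d :: ds) (k + 1) = pvFA ds k := by
  unfold pvFA
  simp only [List.length_cons]
  have hlen : ds.length + 1 - (k + 1) - 1 = ds.length - k - 1 := by omega
  rw [hlen]
  congr 1
  apply List.map_congr_left
  intro j hj
  rw [List.mem_range] at hj
  have h1 : ds.length + 1 - 1 - j = (ds.length - 1 - j) + 1 := by omega
  rw [h1, List.getD_cons_succ]

theorem pvFA_zero (d : Int) (ds : List Int) : pvFA (d :: ds) 0 = ds.prod := by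
  unfold pvFA
  simp only [List.length_cons, Nat.add_sub_cancel, Nat.sub_zero]
  have h : (List.range ds.length).map (fun j => (d :: ds).getD (ds.length - j) 0)
      = ds.reverse := by
    apply List.ext_getElem
    · simp
    · intro i h1 h2
      simp only [List.length_map, List.length_range] at h1
      simp only [List.getElem_map, List.getElem_range, List.getElem_reverse]
      have h3 : ds.length - i = (ds.length - 1 - i) + 1 := by omega
      rw [h3, List.getD_cons_succ, List.getD_eq_getElem ds 0 (by omega)]
  rw [h, List.prod_reverse]

theorem pv_foldl_mul {β : Type} (l : List β) (g : β → Int) (a : Int) :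
    l.foldl (fun acc x => acc * g x) a = a * (l.map g).prod := by
  induction l generalizing a with
  | nil => simp
  | cons x xs ih => simp [ih, mul_assoc]

-- A = the Nat-range sum form, part 1: cast cleanup of the port's Int ranges and indices
theorem A_eq_sum (ind dims : List Int) :
    index_1D ind dims
      = ((List.range dims.length).map (fun k => pvFA dims k * ind.getD k 0)).sum := by
  unfold index_1D
  rw [PySem.List.pyRange_zero_nat, List.foldl_map, PySem.List.foldl_add, zero_add]
  congr 1
  apply List.map_congr_left
  intro k hk
  rw [List.mem_range] at hk
  simp only [PySem.List.pyGetD_natCast]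
  congr 1
  have hn : ((dims.length : Int) - (k : Int) - 1) = ((dims.length - k - 1 : Nat) : Int) := by
    omega
  rw [hn, PySem.List.pyRange_zero_nat, List.foldl_map, pv_foldl_mul, one_mul]
  unfold pvFA
  congr 1
  apply List.map_congr_left
  intro j hj
  rw [List.mem_range] at hj
  have h1 : ((dims.length : Int) - 1 - (j : Int)) = ((dims.length - 1 - j : Nat) : Int) := by
    omega
  rw [h1]
  simp [PySem.List.pyGetD_natCast]

-- sum form = pvG
theorem sum_eq_pvG (dims ind : List Int) :
    ((List.range dims.length).map (fun k => pvFA dims k * ind.getD k 0)).sum = pvG ind dims := by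
  induction dims generalizing ind with
  | nil => simp [pvG_nil_right]
  | cons d ds ih =>
      rw [List.length_cons, List.range_succ_eq_map]
      simp only [List.map_cons, List.map_map, List.sum_cons, Function.comp_def, Nat.succ_eq_add_one]
      have h : ((List.range ds.length).map
          (fun k => pvFA (d :: ds) (k + 1) * ind.getD (k + 1) 0)).sum
          = pvG ind.tail ds := by
        rw [← ih ind.tail]
        congr 1
        apply List.map_congr_left
        intro k _
        rw [pvFA_succ, getD_tail]
      rw [pvG_cons, h, pvFA_zero]
      ring_nf

-- B's fold over the reversed Nat range
theorem B_core (dims ind : List Int) (s : Int × Int) :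
    (List.range dims.length).reverse.foldl
      (fun (s : Int × Int) (k : Nat) => (s.1 + s.2 * ind.getD k 0, s.2 * dims.getD k 0)) s
      = (s.1 + s.2 * pvG ind dims, s.2 * dims.prod) := by
  induction dims generalizing ind s with
  | nil => simp [pvG_nil_right]
  | cons d ds ih =>
      rw [List.length_cons, List.range_succ_eq_map, List.reverse_cons, ← List.map_reverse,
        List.foldl_append, List.foldl_map]
      simp only [Nat.succ_eq_add_one, getD_tail, List.getD_cons_succ]
      rw [ih ind.tail s]
      simp only [List.foldl_cons, List.foldl_nil, List.getD_cons_zero, pvG_cons,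
        List.prod_cons, Prod.mk.injEq]
      constructor <;> ring

theorem A_eq_pvG (ind dims : List Int) : index_1D ind dims = pvG ind dims := by
  rw [A_eq_sum, sum_eq_pvG]

theorem B_eq_pvG (ind dims : List Int) : index_1D_alt ind dims = pvG ind dims := by
  unfold index_1D_alt
  rw [PySem.List.pyRange_neg_one_eq_reverse]
  rw [show ((dims.length : Int) - 1 + 1) = (dims.length : Int) by ring,
    show ((-1 : Int) + 1) = 0 by ring]
  rw [PySem.List.pyRange_zero_nat, ← List.map_reverse, List.foldl_map]
  simp only [PySem.List.pyGetD_natCast]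
  rw [B_core]
  simp

-- ===== VERDICT (by name: the statement is the Claim_ definition above) =====
theorem index_1D_spec : Claim_equal_index_1D := by
  intro ind dims _ _
  unfold Spec_index_1D
  rw [A_eq_pvG, B_eq_pvG]
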